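-- pv_equiv track=rewrite | github.com/julianjc84/VoiceToText | compare_models.py | find_word_diffs
-- ===== SOURCE A (Python) =====
-- def find_word_diffs(texts):
--     """Find words that differ between transcriptions."""
--     word_lists = [t.lower().split() for t in texts]
--     if not any(word_lists):
--         return []
--
--     # Find words present in some but not all outputs
--     all_words = set()
--     for wl in word_lists:
--         all_words.update(wl)
--
--     differing = set()
--     for word in all_words:
--         counts = [wl.count(word) for wl in word_lists]
--         if len(set(counts)) > 1:
--             differing.add(word)
--     return differing
-- ===== SOURCE B (Python) =====
-- def _counter(words):
--     c = {}
--     for w in words: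
--         c[w] = c.get(w, 0) + 1
--     return c
--
--
-- def _union(c1, c2):
--     """Element-wise maximum multiset (Counter | semantics: c1's key order first)."""
--     r = {w: n if n >= c2.get(w, 0) else c2[w] for w, n in c1.items()}
--     for w, n in c2.items():
--         if w not in r:
--             r[w] = n
--     return r
--
--
-- def _inter(c1, c2):
--     """Element-wise minimum multiset (Counter & semantics: zero counts dropped)."""
--     return {w: min(n, c2[w]) for w, n in c1.items() if w in c2}
--
--
-- def find_word_diffs(texts):
--     """Find words that differ between transcriptions."""
--     word_lists = [t.lower().split() for t in texts]
--     if not any(word_lists):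
--         return []
--
--     # Reduce the per-list multisets to their element-wise max and min;
--     # a word's count is constant across all lists iff max == min (absence = 0).
--     counters = [_counter(wl) for wl in word_lists]
--     maxs = counters[0]
--     mins = counters[0]
--     for c in counters[1:]:
--         maxs = _union(maxs, c)
--         mins = _inter(mins, c)
--     return {w for w in maxs if maxs[w] != mins.get(w, 0)}
-- ===== Notes on version B (the rewrite author's own statement) =====
-- stated objective: alternative
-- what changed: Instead of re-scanning every word list with wl.count(word) for each distinct word, B reduces the per-list count multisets to their element-wise maximum and minimum (Counter |-style union and &-style intersection folds) and reports the words whose max count differs from their min count (absence counting as 0).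
import Mathlib
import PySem

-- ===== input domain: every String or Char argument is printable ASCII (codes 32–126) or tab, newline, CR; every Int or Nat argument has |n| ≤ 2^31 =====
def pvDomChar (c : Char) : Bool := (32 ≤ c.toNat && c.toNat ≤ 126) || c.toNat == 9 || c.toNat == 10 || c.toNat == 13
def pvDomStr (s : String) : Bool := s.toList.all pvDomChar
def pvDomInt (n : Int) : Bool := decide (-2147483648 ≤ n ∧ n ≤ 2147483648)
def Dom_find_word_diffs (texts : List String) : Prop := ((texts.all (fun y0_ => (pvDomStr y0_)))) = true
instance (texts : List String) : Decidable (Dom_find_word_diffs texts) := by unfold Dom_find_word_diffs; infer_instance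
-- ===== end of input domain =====

-- B replaces A's per-word repeated wl.count(word) scans by two multiset reductions:
-- the element-wise maximum and minimum of the per-list count multisets; a word differs
-- iff its max count differs from its min count (objective: alternative).

-- ===== PORT A =====
def find_word_diffs (texts : List String) : List String :=
  let word_lists := texts.map (fun t => PySem.Str.split₀ (PySem.Str.lower t))
  if !(word_lists.any (fun wl => !wl.isEmpty)) then []
  else
    let all_words : PySem.Set String :=
      word_lists.foldl (fun s wl => PySem.Set.update s wl) PySem.Set.empty
    let differing : PySem.Set String :=
      all_words.foldl (fun d word =>
        let counts : List Int := word_lists.map (fun wl => (PySem.List.count wl word : Int))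
        if 1 < (PySem.Set.ofList counts).length then PySem.Set.add d word else d)
        PySem.Set.empty
    differing

-- ===== PORT B =====
-- B-side helpers: _counter, _union, _inter from Source B
def fwdCounter (words : List String) : PySem.Dict String Int :=
  words.foldl (fun c w => c.insert w (c.getD w 0 + 1)) PySem.Dict.empty

def fwdUnion (c1 c2 : PySem.Dict String Int) : PySem.Dict String Int :=
  let r := c1.items.foldl
    (fun r p => r.insert p.1 (if c2.getD p.1 0 ≤ p.2 then p.2 else c2.getD p.1 0))
    PySem.Dict.empty
  c2.items.foldl (fun r p => if r.contains p.1 then r else r.insert p.1 p.2) r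

def fwdInter (c1 c2 : PySem.Dict String Int) : PySem.Dict String Int :=
  c1.items.foldl
    (fun r p => if c2.contains p.1 then r.insert p.1 (min p.2 (c2.getD p.1 0)) else r)
    PySem.Dict.empty

def find_word_diffs_alt (texts : List String) : List String :=
  let word_lists := texts.map (fun t => PySem.Str.split₀ (PySem.Str.lower t))
  if !(word_lists.any (fun wl => !wl.isEmpty)) then []
  else
    let counters := word_lists.map fwdCounter
    -- counters[0] (nonempty under the guard) and the loop over counters[1:]
    let st := (counters.drop 1).foldl
      (fun (acc : PySem.Dict String Int × PySem.Dict String Int) c =>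
        (fwdUnion acc.1 c, fwdInter acc.2 c))
      (counters.headD PySem.Dict.empty, counters.headD PySem.Dict.empty)
    PySem.Set.ofList (st.1.keys.filter (fun w => st.1.getD w 0 != st.2.getD w 0))

-- ===== PRECONDITION & SPEC =====
def Spec_find_word_diffs (texts : List String) (out : List String) : Prop := out = find_word_diffs_alt texts
instance (texts : List String) (out : List String) : Decidable (Spec_find_word_diffs texts out) := by unfold Spec_find_word_diffs; infer_instance

-- ===== CLAIM (what is proved, stated in full; the proofs are below) =====
def Claim_equal_find_word_diffs : Prop := ∀ (texts : List String), Dom_find_word_diffs texts → Spec_find_word_diffs texts (find_word_diffs texts)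


-- ===== LEMMAS AND PROOFS =====

-- A counter-like dict: unique keys, positive count at every key.
def goodCtr (c : PySem.Dict String Int) : Prop :=
  c.keys.Nodup ∧ ∀ w ∈ c.keys, 0 < c.getD w 0

lemma getD_nonneg (c : PySem.Dict String Int) (h : goodCtr c) (w : String) :
    0 ≤ c.getD w 0 := by
  cases hc : c.contains w with
  | false => rw [PySem.Dict.getD_of_not_contains _ _ hc]
  | true => exact le_of_lt (h.2 w ((PySem.Dict.contains_iff_mem_keys _ _).mp hc))

lemma goodCtr_counter (wl : List String) : goodCtr (PySem.Dict.counter wl) := by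
  refine ⟨PySem.Dict.nodup_keys_counter wl, fun w hw => ?_⟩
  rw [PySem.Dict.getD_counter]
  rw [PySem.Dict.keys_counter, PySem.Set.mem_ofList] at hw
  exact_mod_cast List.count_pos_iff.mpr hw

lemma exists_mem_items (c : PySem.Dict String Int) {w : String} (h : w ∈ c.keys) :
    ∃ v, (w, v) ∈ c.items := by
  simp only [PySem.Dict.keys, List.mem_map] at h
  obtain ⟨p, hp, rfl⟩ := h
  exact ⟨p.2, hp⟩

lemma contains_false_of_not_mem (c : PySem.Dict String Int) {w : String} (h : w ∉ c.keys) :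
    c.contains w = false := by
  cases hc : c.contains w with
  | false => rfl
  | true => exact absurd ((PySem.Dict.contains_iff_mem_keys _ _).mp hc) h

-- B's conditional-insert loop ('if w not in r: r[w] = n') adds the new keys in order
-- and leaves existing entries untouched.
lemma condInsert (l : List (String × Int)) : ∀ r : PySem.Dict String Int,
    (l.foldl (fun r p => if r.contains p.1 then r else r.insert p.1 p.2) r).keys
      = PySem.Set.update r.keys (l.map Prod.fst)
    ∧ ∀ w, (l.foldl (fun r p => if r.contains p.1 then r else r.insert p.1 p.2) r).get? w
        = if r.contains w then r.get? w else (PySem.Dict.mk l).get? w := by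
  induction l with
  | nil =>
    intro r
    refine ⟨by simp [PySem.Set.update_nil], fun w => ?_⟩
    by_cases hc : r.contains w = true
    · rw [List.foldl_nil, if_pos hc]
    · have hn : r.get? w = none := by
        have h := PySem.Dict.contains_eq_isSome_get? r w
        rw [Bool.eq_false_iff.mpr hc] at h
        exact Option.not_isSome_iff_eq_none.mp (by rw [← h]; exact Bool.false_ne_true)
      have hmk : (PySem.Dict.mk ([] : List (String × Int))).get? w = none :=
        PySem.Dict.get?_empty w
      rw [List.foldl_nil, if_neg hc, hn, hmk]
  | cons p l ih =>
    intro r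
    simp only [List.foldl_cons, List.map_cons, PySem.Set.update_cons]
    by_cases hc : r.contains p.1 = true
    · rw [if_pos hc]
      refine ⟨?_, fun w => ?_⟩
      · rw [(ih r).1, PySem.Set.add_of_mem ((PySem.Dict.contains_iff_mem_keys _ _).mp hc)]
      · rw [(ih r).2 w, PySem.Dict.get?_mk_cons]
        by_cases hw : r.contains w = true
        · rw [if_pos hw, if_pos hw]
        · rw [if_neg hw, if_neg hw]
          have hne : (p.1 == w) = false := by
            apply beq_eq_false_iff_ne.mpr
            intro he
            exact hw (he ▸ hc)
          rw [hne, if_neg Bool.false_ne_true]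
    · rw [if_neg hc]
      have hcf : r.contains p.1 = false := Bool.eq_false_iff.mpr hc
      refine ⟨?_, fun w => ?_⟩
      · rw [(ih _).1, PySem.Dict.keys_insert_of_not_contains _ _ hcf,
          PySem.Set.add_of_not_mem (fun hm => hc ((PySem.Dict.contains_iff_mem_keys _ _).mpr hm))]
      · by_cases hwp : w = p.1
        · have h1 : (r.insert p.1 p.2).contains w = true := by
            rw [PySem.Dict.contains_insert, beq_iff_eq.mpr hwp]
            simp
          have h2 : (r.insert p.1 p.2).get? w = some p.2 := by
            rw [hwp, PySem.Dict.get?_insert_self]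
          have h3 : (p.1 == w) = true := beq_iff_eq.mpr hwp.symm
          rw [(ih (r.insert p.1 p.2)).2 w, PySem.Dict.get?_mk_cons,
            if_pos h1, h2, if_neg (fun h => hc (hwp ▸ h)), if_pos h3]
        · have hbe : (w == p.1) = false := beq_eq_false_iff_ne.mpr hwp
          have hbe2 : (p.1 == w) = false := beq_eq_false_iff_ne.mpr (Ne.symm hwp)
          have h1 : (r.insert p.1 p.2).contains w = r.contains w := by
            rw [PySem.Dict.contains_insert, hbe, Bool.false_or]
          rw [(ih (r.insert p.1 p.2)).2 w, h1, PySem.Dict.get?_insert_of_ne _ _ hwp,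
            PySem.Dict.get?_mk_cons, hbe2]
          by_cases hw : r.contains w = true
          · rw [if_pos hw, if_pos hw]
          · rw [if_neg hw, if_neg hw, if_neg Bool.false_ne_true]

-- B's _union is the element-wise maximum: keys in first-appearance order, values max.
lemma union_spec (c1 c2 : PySem.Dict String Int) (h1 : goodCtr c1) (h2 : goodCtr c2) :
    (fwdUnion c1 c2).keys = PySem.Set.update c1.keys c2.keys
    ∧ goodCtr (fwdUnion c1 c2)
    ∧ ∀ w, (fwdUnion c1 c2).getD w 0 = max (c1.getD w 0) (c2.getD w 0) := by
  have hfresh : ∀ p ∈ c1.items, (PySem.Dict.empty : PySem.Dict String Int).contains p.1 = false :=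
    fun p _ => PySem.Dict.contains_empty p.1
  have hnd : (c1.items.map Prod.fst).Nodup := h1.1
  have hitems : (c1.items.foldl
      (fun r p => r.insert p.1 (if c2.getD p.1 0 ≤ p.2 then p.2 else c2.getD p.1 0))
      PySem.Dict.empty).items
      = c1.items.map (fun p => (p.1, if c2.getD p.1 0 ≤ p.2 then p.2 else c2.getD p.1 0)) := by
    rw [PySem.Dict.items_foldl_insert_fresh c1.items Prod.fst
      (fun p => if c2.getD p.1 0 ≤ p.2 then p.2 else c2.getD p.1 0) PySem.Dict.empty hfresh hnd]
    rfl
  set r0 := c1.items.foldl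
    (fun r p => r.insert p.1 (if c2.getD p.1 0 ≤ p.2 then p.2 else c2.getD p.1 0))
    PySem.Dict.empty with hr0
  have hkeys0 : r0.keys = c1.keys := by
    show r0.items.map Prod.fst = c1.items.map Prod.fst
    rw [hitems, List.map_map]
    rfl
  have hnd0 : r0.keys.Nodup := by rw [hkeys0]; exact h1.1
  obtain ⟨hk, hg⟩ := condInsert c2.items r0
  have hmk : (PySem.Dict.mk c2.items) = c2 := rfl
  have hc2keys : c2.items.map Prod.fst = c2.keys := rfl
  have hukeys : (fwdUnion c1 c2).keys = PySem.Set.update c1.keys c2.keys := by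
    show (c2.items.foldl (fun r p => if r.contains p.1 then r else r.insert p.1 p.2) r0).keys
      = PySem.Set.update c1.keys c2.keys
    rw [hk, hkeys0, hc2keys]
  have hgetD : ∀ w, (fwdUnion c1 c2).getD w 0 = max (c1.getD w 0) (c2.getD w 0) := by
    intro w
    have hget : (fwdUnion c1 c2).get? w
        = if r0.contains w then r0.get? w else c2.get? w := by
      show (c2.items.foldl (fun r p => if r.contains p.1 then r else r.insert p.1 p.2) r0).get? w
        = if r0.contains w then r0.get? w else c2.get? w
      rw [hg w, hmk]
    rw [PySem.Dict.getD_eq_get?_getD, hget]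
    by_cases hw : w ∈ c1.keys
    · have hcw : r0.contains w = true :=
        (PySem.Dict.contains_iff_mem_keys _ _).mpr (by rwa [hkeys0])
      obtain ⟨v, hv⟩ := exists_mem_items c1 hw
      have hv0 : (w, if c2.getD w 0 ≤ v then v else c2.getD w 0) ∈ r0.items := by
        rw [hitems]
        exact List.mem_map.mpr ⟨(w, v), hv, rfl⟩
      have hr0get : r0.get? w = some (if c2.getD w 0 ≤ v then v else c2.getD w 0) :=
        PySem.Dict.get?_of_mem_items r0 hv0 hnd0
      have hc1v : c1.getD w 0 = v := PySem.Dict.getD_of_mem_items c1 hv h1.1 0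
      rw [if_pos hcw, hr0get, hc1v]
      show (if c2.getD w 0 ≤ v then v else c2.getD w 0) = max v (c2.getD w 0)
      split_ifs with h
      · exact (max_eq_left h).symm
      · exact (max_eq_right (not_le.mp h).le).symm
    · have hcw : r0.contains w = false := contains_false_of_not_mem r0 (by rwa [hkeys0])
      rw [if_neg (by rw [hcw]; exact Bool.false_ne_true)]
      have hc10 : c1.getD w 0 = 0 :=
        PySem.Dict.getD_of_not_contains c1 0 (contains_false_of_not_mem c1 hw)
      rw [hc10, ← PySem.Dict.getD_eq_get?_getD]
      exact (max_eq_right (getD_nonneg c2 h2 w)).symm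
  refine ⟨hukeys, ⟨?_, fun w hw => ?_⟩, hgetD⟩
  · rw [hukeys]; exact PySem.Set.nodup_update _ _ h1.1
  · rw [hgetD w]
    rw [hukeys, PySem.Set.mem_update] at hw
    cases hw with
    | inl h => exact lt_max_of_lt_left (h1.2 w h)
    | inr h => exact lt_max_of_lt_right (h2.2 w h)

-- B's _inter is the element-wise minimum (with absence as 0).
lemma inter_spec (c1 c2 : PySem.Dict String Int) (h1 : goodCtr c1) (h2 : goodCtr c2) :
    goodCtr (fwdInter c1 c2)
    ∧ ∀ w, (fwdInter c1 c2).getD w 0 = min (c1.getD w 0) (c2.getD w 0) := by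
  have hfold : fwdInter c1 c2
      = (c1.items.filter (fun p => c2.contains p.1)).foldl
          (fun r p => r.insert p.1 (min p.2 (c2.getD p.1 0))) PySem.Dict.empty := by
    rw [fwdInter, List.foldl_filter]
  have hsub : ((c1.items.filter (fun p => c2.contains p.1)).map Prod.fst).Sublist
      (c1.items.map Prod.fst) := List.Sublist.map Prod.fst List.filter_sublist
  have hnd : ((c1.items.filter (fun p => c2.contains p.1)).map Prod.fst).Nodup :=
    hsub.nodup h1.1
  have hitems : (fwdInter c1 c2).items
      = (c1.items.filter (fun p => c2.contains p.1)).map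
          (fun p => (p.1, min p.2 (c2.getD p.1 0))) := by
    rw [hfold]
    rw [PySem.Dict.items_foldl_insert_fresh _ Prod.fst
      (fun p => min p.2 (c2.getD p.1 0)) PySem.Dict.empty
      (fun p _ => PySem.Dict.contains_empty p.1) hnd]
    rfl
  have hkeys : (fwdInter c1 c2).keys
      = (c1.items.filter (fun p => c2.contains p.1)).map Prod.fst := by
    show (fwdInter c1 c2).items.map Prod.fst = _
    rw [hitems, List.map_map]
    rfl
  have hndk : (fwdInter c1 c2).keys.Nodup := by rw [hkeys]; exact hnd
  have hgetD : ∀ w, (fwdInter c1 c2).getD w 0 = min (c1.getD w 0) (c2.getD w 0) := by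
    intro w
    by_cases hw : w ∈ c1.keys ∧ c2.contains w = true
    · obtain ⟨v, hv⟩ := exists_mem_items c1 hw.1
      have hmem : (w, min v (c2.getD w 0)) ∈ (fwdInter c1 c2).items := by
        rw [hitems]
        exact List.mem_map.mpr ⟨(w, v), List.mem_filter.mpr ⟨hv, hw.2⟩, rfl⟩
      rw [PySem.Dict.getD_of_mem_items _ hmem hndk 0,
        PySem.Dict.getD_of_mem_items c1 hv h1.1 0]
    · have hnk : w ∉ (fwdInter c1 c2).keys := by
        rw [hkeys]
        intro hm
        obtain ⟨p, hp, hpw⟩ := List.mem_map.mp hm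
        obtain ⟨hpi, hpc⟩ := List.mem_filter.mp hp
        exact hw ⟨by
          rw [← hpw]
          exact List.mem_map.mpr ⟨p, hpi, rfl⟩, by rwa [hpw] at hpc⟩
      rw [PySem.Dict.getD_of_not_contains _ 0 (contains_false_of_not_mem _ hnk)]
      rcases Decidable.not_and_iff_or_not.mp hw with h | h
      · rw [PySem.Dict.getD_of_not_contains c1 0 (contains_false_of_not_mem c1 h)]
        exact (min_eq_left (getD_nonneg c2 h2 w)).symm
      · have : c2.contains w = false := by
          cases hc : c2.contains w with
          | false => rfl
          | true => exact absurd hc h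
        rw [PySem.Dict.getD_of_not_contains c2 0 this]
        exact (min_eq_right (getD_nonneg c1 h1 w)).symm
  refine ⟨⟨hndk, fun w hw => ?_⟩, hgetD⟩
  rw [hgetD w]
  rw [hkeys] at hw
  obtain ⟨p, hp, hpw⟩ := List.mem_map.mp hw
  obtain ⟨hpi, hpc⟩ := List.mem_filter.mp hp
  have hw1 : w ∈ c1.keys := by rw [← hpw]; exact List.mem_map.mpr ⟨p, hpi, rfl⟩
  have hw2 : w ∈ c2.keys := (PySem.Dict.contains_iff_mem_keys _ _).mp (by rwa [hpw] at hpc)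
  exact lt_min (h1.2 w hw1) (h2.2 w hw2)

-- B's reduction loop: keys accumulate as A's vocabulary loop does, values are
-- the running maxima / minima of the per-counter values.
lemma bfold (cs : List (PySem.Dict String Int)) : ∀ (M N : PySem.Dict String Int),
    goodCtr M → goodCtr N → (∀ c ∈ cs, goodCtr c) →
    (cs.foldl (fun (acc : PySem.Dict String Int × PySem.Dict String Int) c =>
        (fwdUnion acc.1 c, fwdInter acc.2 c)) (M, N)).1.keys
      = cs.foldl (fun s c => PySem.Set.update s c.keys) M.keys
    ∧ (∀ w, (cs.foldl (fun (acc : PySem.Dict String Int × PySem.Dict String Int) c =>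
        (fwdUnion acc.1 c, fwdInter acc.2 c)) (M, N)).1.getD w 0
      = cs.foldl (fun a c => max a (c.getD w 0)) (M.getD w 0))
    ∧ (∀ w, (cs.foldl (fun (acc : PySem.Dict String Int × PySem.Dict String Int) c =>
        (fwdUnion acc.1 c, fwdInter acc.2 c)) (M, N)).2.getD w 0
      = cs.foldl (fun a c => min a (c.getD w 0)) (N.getD w 0)) := by
  induction cs with
  | nil => exact fun M N _ _ _ => ⟨rfl, fun _ => rfl, fun _ => rfl⟩
  | cons c cs ih =>
    intro M N hM hN hcs
    have hc := hcs c List.mem_cons_self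
    obtain ⟨huk, hug, huv⟩ := union_spec M c hM hc
    obtain ⟨hig, hiv⟩ := inter_spec N c hN hc
    obtain ⟨ihk, ihu, ihi⟩ := ih (fwdUnion M c) (fwdInter N c) hug hig
      (fun c' hc' => hcs c' (List.mem_cons_of_mem _ hc'))
    refine ⟨?_, fun w => ?_, fun w => ?_⟩
    · simpa [huk] using ihk
    · simpa [huv w] using ihu w
    · simpa [hiv w] using ihi w

lemma update_ofList (s : PySem.Set String) (xs : List String) :
    PySem.Set.update s (PySem.Set.ofList xs) = PySem.Set.update s xs := by
  rw [PySem.Set.update_eq_append_filter, PySem.Set.update_eq_append_filter,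
    PySem.Set.ofList_ofList]

-- A's 'len(set(counts)) > 1' on a nonempty count list = some count differs from the first.
lemma one_lt_ofList_length_iff (c0 : Int) (cs : List Int) :
    1 < (PySem.Set.ofList (c0 :: cs)).length ↔ ∃ y ∈ cs, y ≠ c0 := by
  rw [PySem.Set.ofList_cons]
  simp only [List.length_cons, Nat.lt_add_left_iff_pos, List.length_pos_iff_exists_mem]
  constructor
  · rintro ⟨y, hy⟩
    rcases (PySem.Set.mem_discard _ _ _).1 hy with ⟨h1, h2⟩
    exact ⟨y, (PySem.Set.mem_ofList _ _).1 h1, h2⟩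
  · rintro ⟨y, hy, hne⟩
    exact ⟨y, (PySem.Set.mem_discard _ _ _).2 ⟨(PySem.Set.mem_ofList _ _).2 hy, hne⟩⟩

lemma foldl_min_le (cs : List Int) : ∀ a : Int,
    cs.foldl min a ≤ a ∧ ∀ y ∈ cs, cs.foldl min a ≤ y := by
  induction cs with
  | nil => exact fun a => ⟨le_refl a, fun y hy => absurd hy (List.not_mem_nil)⟩
  | cons c cs ih =>
    intro a
    refine ⟨le_trans (ih (min a c)).1 (min_le_left a c), fun y hy => ?_⟩
    rcases List.mem_cons.mp hy with rfl | hy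
    · exact le_trans (ih (min a y)).1 (min_le_right a y)
    · exact (ih (min a c)).2 y hy

lemma foldl_const_of_all_eq (cs : List Int) : ∀ a : Int, (∀ y ∈ cs, y = a) →
    cs.foldl max a = a ∧ cs.foldl min a = a := by
  induction cs with
  | nil => exact fun a _ => ⟨rfl, rfl⟩
  | cons c cs ih =>
    intro a h
    have hc : c = a := h c List.mem_cons_self
    subst hc
    simpa [max_self, min_self] using ih c (fun y hy => h y (List.mem_cons_of_mem _ hy))

-- max count = min count iff every count equals the first one.
lemma foldl_max_ne_min_iff (cs : List Int) (a : Int) :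
    cs.foldl max a ≠ cs.foldl min a ↔ ∃ y ∈ cs, y ≠ a := by
  constructor
  · intro h
    by_contra hno
    have hall : ∀ y ∈ cs, y = a := fun y hy =>
      not_not.mp (fun hne => hno ⟨y, hy, hne⟩)
    obtain ⟨h1, h2⟩ := foldl_const_of_all_eq cs a hall
    exact h (h1.trans h2.symm)
  · rintro ⟨y, hy, hne⟩
    rcases lt_or_gt_of_ne hne with hlt | hgt
    · have h1 : cs.foldl min a ≤ y := (foldl_min_le cs a).2 y hy
      have h2 : a ≤ cs.foldl max a := (PySem.List.le_foldl_max cs a).1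
      omega
    · have h1 : cs.foldl min a ≤ a := (foldl_min_le cs a).1
      have h2 : y ≤ cs.foldl max a := (PySem.List.le_foldl_max cs a).2 y hy
      omega

-- ===== VERDICT (by name: the statement is the Claim_ definition above) =====
theorem find_word_diffs_spec : Claim_equal_find_word_diffs := by
  intro texts _
  unfold Spec_find_word_diffs find_word_diffs find_word_diffs_alt
  set wls := texts.map (fun t => PySem.Str.split₀ (PySem.Str.lower t)) with hwls
  by_cases hg : (!(wls.any (fun wl => !wl.isEmpty))) = true
  · simp only [hg, if_pos]
  · simp only [Bool.not_eq_true] at hg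
    simp only [hg, Bool.false_eq_true, if_false]
    have hne : wls ≠ [] := by
      intro h; rw [h] at hg; simp at hg
    obtain ⟨wl0, rest, hcons⟩ := List.exists_cons_of_ne_nil hne
    -- B's counters are Counter(wl) for each wl
    have hctr : fwdCounter = fun wl => PySem.Dict.counter wl :=
      funext fun wl => PySem.Dict.foldl_insert_getD_add_one_eq_counter wl
    -- A's differing loop is a filter over all_words
    rw [PySem.List.foldl_ite_eq_foldl_filter
      (fun word => 1 < (PySem.Set.ofList (wls.map
        (fun wl => (PySem.List.count wl word : Int)))).length) PySem.Set.add]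
    rw [hctr, hcons, List.map_cons, List.headD_cons, List.drop_succ_cons, List.drop_zero]
    obtain ⟨hbk, hbu, hbi⟩ := bfold (rest.map (fun wl => PySem.Dict.counter wl))
      (PySem.Dict.counter wl0) (PySem.Dict.counter wl0)
      (goodCtr_counter wl0) (goodCtr_counter wl0)
      (by rintro c hc; obtain ⟨wl, _, rfl⟩ := List.mem_map.mp hc; exact goodCtr_counter wl)
    set st := ((rest.map (fun wl => PySem.Dict.counter wl)).foldl
      (fun (acc : PySem.Dict String Int × PySem.Dict String Int) c =>
        (fwdUnion acc.1 c, fwdInter acc.2 c))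
      (PySem.Dict.counter wl0, PySem.Dict.counter wl0)) with hst
    -- st.1's keys are A's all_words
    have hkeys : st.1.keys
        = (wl0 :: rest).foldl (fun s wl => PySem.Set.update s wl) PySem.Set.empty := by
      rw [hbk]
      simp only [List.foldl_map, PySem.Dict.keys_counter, update_ofList]
      show _ = rest.foldl (fun s wl => PySem.Set.update s wl)
        (PySem.Set.update PySem.Set.empty wl0)
      rw [show PySem.Set.update (PySem.Set.empty : PySem.Set String) wl0
            = PySem.Set.ofList wl0 from PySem.Set.update_nil_left wl0]
    rw [← hkeys]
    rw [show (PySem.Set.empty : PySem.Set String) = ([] : PySem.Set String) from rfl,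
      ← PySem.Set.ofList_eq_foldl]
    apply congrArg PySem.Set.ofList
    apply List.filter_congr
    intro w _
    have hmax : st.1.getD w 0 = (rest.map (fun wl => (PySem.Dict.counter wl).getD w 0)).foldl
        max ((PySem.Dict.counter wl0).getD w 0) := by
      rw [hbu w]; simp only [List.foldl_map]
    have hmin : st.2.getD w 0 = (rest.map (fun wl => (PySem.Dict.counter wl).getD w 0)).foldl
        min ((PySem.Dict.counter wl0).getD w 0) := by
      rw [hbi w]; simp only [List.foldl_map]
    rw [Bool.eq_iff_iff, decide_eq_true_eq, bne_iff_ne]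
    rw [List.map_cons, one_lt_ofList_length_iff, hmax, hmin, foldl_max_ne_min_iff]
    simp only [PySem.List.count_eq, PySem.Dict.getD_counter]
    try rfl
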